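-- pv_equiv track=rewrite | github.com/KibaeKim/ConvertToDimacs | ConvertToDimacs.py | get_principle_operator
-- ===== SOURCE A (Python) =====
-- def get_principle_operator(sentence):
-- 	open_parentheses = 0
-- 	principle_operator = -1
-- 	i = 0
-- 	for char in sentence:
-- 		if (char == '('):
-- 			open_parentheses += 1
-- 		elif (char == ')'):
-- 			open_parentheses -= 1
-- 		elif (
-- 			open_parentheses == 0 and
-- 			char == '->'
-- 			):
-- 			return i
--
-- 		#	One of {~,^,v} can be the principle operator only when -> is not the principle operator and
-- 		#	it is the first of {~,^,v} to appear
-- 		elif (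
-- 			open_parentheses == 0 and
-- 			(char == '^' or char == 'v' or char == '~') and
-- 			principle_operator == -1
-- 			):
-- 			principle_operator = i
-- 		i+=1
-- 	return principle_operator
-- ===== SOURCE B (Python) =====
-- def get_principle_operator(sentence):
-- 	# Two-pass: precompute parenthesis depth before each position, then
-- 	# return the first top-level occurrence of an operator.
-- 	depth = 0
-- 	depths = []
-- 	for c in sentence:
-- 		depths.append(depth)
-- 		depth += (c == '(') - (c == ')')
-- 	for i, c in enumerate(sentence):
-- 		if c in '^v~' and depths[i] == 0:
-- 			return i
-- 	return -1
-- ===== Notes on version B (the rewrite author's own statement) =====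
-- stated objective: idiomatic
-- what changed: Replaces the single stateful scan (accumulator for the first top-level operator, carried to the end) with a two-pass form: build a depth-before table, then return early at the first top-level operator; the unreachable branch comparing the one-character loop variable to a two-character operator string is dropped.
import Mathlib
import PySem

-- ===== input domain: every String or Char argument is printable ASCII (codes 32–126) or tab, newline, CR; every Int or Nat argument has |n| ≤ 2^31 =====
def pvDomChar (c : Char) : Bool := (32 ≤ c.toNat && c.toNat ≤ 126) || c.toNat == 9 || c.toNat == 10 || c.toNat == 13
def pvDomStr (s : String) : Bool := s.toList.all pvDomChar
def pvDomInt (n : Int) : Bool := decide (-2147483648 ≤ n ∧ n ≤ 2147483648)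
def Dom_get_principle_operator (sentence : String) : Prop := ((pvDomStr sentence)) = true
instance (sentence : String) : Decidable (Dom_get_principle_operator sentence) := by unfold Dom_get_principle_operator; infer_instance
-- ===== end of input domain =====

-- B replaces A's single stateful scan by a depth-table pass plus an early-return search (idiomatic; dead '->' branch dropped).


-- ===== PORT A =====
-- loop with early return ('->' branch), state (open_parentheses, principle_operator, i)
def gpoLoopA : List Char → Int → Int → Int → Int
  | [], _, po, _ => po
  | c :: rest, op, po, i =>
    if c = '(' then gpoLoopA rest (op + 1) po (i + 1)
    else if c = ')' then gpoLoopA rest (op - 1) po (i + 1)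
    else if op = 0 ∧ String.ofList [c] = "->" then i   -- Python: char == '->' (char is length 1)
    else if op = 0 ∧ (c = '^' ∨ c = 'v' ∨ c = '~') ∧ po = -1 then gpoLoopA rest op i (i + 1)
    else gpoLoopA rest op po (i + 1)

def get_principle_operator (sentence : String) : Int :=
  gpoLoopA sentence.toList 0 (-1) 0

-- ===== PORT B =====
-- first pass: depth before each position
def gpoDepths : List Char → Int → List Int
  | [], _ => []
  | c :: rest, d =>
      d :: gpoDepths rest (d + (if c = '(' then 1 else 0) - (if c = ')' then 1 else 0))

-- second pass over (char, depth) pairs, early return at first top-level operator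
def gpoSearch : List (Char × Int) → Int → Int
  | [], _ => -1
  | (c, d) :: rest, i =>
      if (c = '^' ∨ c = 'v' ∨ c = '~') ∧ d = 0 then i else gpoSearch rest (i + 1)

def get_principle_operator_alt (sentence : String) : Int :=
  gpoSearch (sentence.toList.zip (gpoDepths sentence.toList 0)) 0

-- ===== PRECONDITION & SPEC =====
def Spec_get_principle_operator (sentence : String) (out : Int) : Prop := out = get_principle_operator_alt sentence
instance (sentence : String) (out : Int) : Decidable (Spec_get_principle_operator sentence out) := by unfold Spec_get_principle_operator; infer_instance

-- ===== CLAIM (what is proved, stated in full; the proofs are below) =====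
def Claim_equal_get_principle_operator : Prop := ∀ (sentence : String), Dom_get_principle_operator sentence → Spec_get_principle_operator sentence (get_principle_operator sentence)

-- ===== LEMMAS AND PROOFS =====

-- a one-character string is never "->"
theorem gpo_not_arrow (c : Char) : ¬ (String.ofList [c] = "->") := by
  intro h
  have h2 : (String.ofList [c]).toList = ("->" : String).toList := congrArg String.toList h
  simp [String.toList_ofList] at h2

-- once the accumulator is set (≠ -1), A's loop never changes it
theorem gpoLoopA_fixed (l : List Char) : ∀ (op po i : Int), po ≠ -1 → gpoLoopA l op po i = po := by
  induction l with
  | nil => intro op po i _; rfl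
  | cons c rest ih =>
    intro op po i hpo
    simp only [gpoLoopA]
    split_ifs with h1 h2 h3 h4
    · exact ih _ _ _ hpo
    · exact ih _ _ _ hpo
    · exact absurd h3.2 (gpo_not_arrow c)
    · exact absurd h4.2.2 hpo
    · exact ih _ _ _ hpo

-- while the accumulator is -1, A's loop computes B's search
theorem gpoLoopA_eq_search (l : List Char) : ∀ (d i : Int), 0 ≤ i →
    gpoLoopA l d (-1) i = gpoSearch (l.zip (gpoDepths l d)) i := by
  induction l with
  | nil => intro d i _; rfl
  | cons c rest ih =>
    intro d i hi
    simp only [gpoLoopA, gpoDepths, List.zip_cons_cons, gpoSearch]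
    by_cases h1 : c = '('
    · subst h1
      simp
      exact ih _ _ (by omega)
    · by_cases h2 : c = ')'
      · subst h2
        simp
        exact ih _ _ (by omega)
      · by_cases hd : d = 0
        · by_cases hc : c = '^' ∨ c = 'v' ∨ c = '~'
          · simp [h1, h2, hd, hc, gpo_not_arrow c]
            exact gpoLoopA_fixed rest 0 i (i + 1) (by omega)
          · simp [h1, h2, hd, hc, gpo_not_arrow c]
            exact ih _ _ (by omega)
        · simp [h1, h2, hd, gpo_not_arrow c]
          exact ih _ _ (by omega)

-- ===== VERDICT (by name: the statement is the Claim_ definition above) =====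
theorem get_principle_operator_spec : Claim_equal_get_principle_operator := by
  intro sentence _
  unfold Spec_get_principle_operator get_principle_operator get_principle_operator_alt
  exact gpoLoopA_eq_search _ 0 0 le_rfl
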